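-- pv_equiv track=rewrite | github.com/eehackspace/tildagon-app-eehneopixellogo | effects.py | keys_before_and_after
-- ===== SOURCE A (Python) =====
-- def keys_before_and_after(numbers_dict, given_number):
--     """
--     Finds the keys that are just before and just after a given number in a dictionary.
--     If the given number is greater than any key in the dictionary, it returns the first key.
--     If the given number is smaller than any key in the dictionary, it returns the last key.
--
--     Arguments:
--     numbers_dict : dict
--         Dictionary containing integer keys.
--     given_number : int
--         The number for which to find the keys before and after.
--
--     Returns:
--     tuple
--         A tuple containing the key before and the key after the given number.
--     """
--     keys = sorted(numbers_dict.keys())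
--
--     key_before = None
--     key_after = None
--
--     for key in keys:
--         if key <= given_number:
--             key_before = key
--         if key > given_number:
--             key_after = key
--             break
--
--     if key_before is None:
--         key_before = keys[-1] if keys else None
--
--     if key_after is None:
--         key_after = keys[0] if keys else None
--
--     return key_before, key_after
-- ===== SOURCE B (Python) =====
-- import bisect
--
-- def keys_before_and_after(numbers_dict, given_number):
--     keys = sorted(numbers_dict.keys())
--     if not keys:
--         return (None, None)
--     idx = bisect.bisect_right(keys, given_number)
--     key_before = keys[idx - 1] if idx > 0 else keys[-1]
--     key_after = keys[idx] if idx < len(keys) else keys[0]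
--     return (key_before, key_after)
-- ===== Notes on version B (the rewrite author's own statement) =====
-- stated objective: idiomatic
-- what changed: Replaces A's linear scan over the sorted keys (with mutable before/after state and a break) by a binary search: bisect_right finds the split index in O(log n), and the neighbours and wraparound defaults are read off by indexing.
import Mathlib
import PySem

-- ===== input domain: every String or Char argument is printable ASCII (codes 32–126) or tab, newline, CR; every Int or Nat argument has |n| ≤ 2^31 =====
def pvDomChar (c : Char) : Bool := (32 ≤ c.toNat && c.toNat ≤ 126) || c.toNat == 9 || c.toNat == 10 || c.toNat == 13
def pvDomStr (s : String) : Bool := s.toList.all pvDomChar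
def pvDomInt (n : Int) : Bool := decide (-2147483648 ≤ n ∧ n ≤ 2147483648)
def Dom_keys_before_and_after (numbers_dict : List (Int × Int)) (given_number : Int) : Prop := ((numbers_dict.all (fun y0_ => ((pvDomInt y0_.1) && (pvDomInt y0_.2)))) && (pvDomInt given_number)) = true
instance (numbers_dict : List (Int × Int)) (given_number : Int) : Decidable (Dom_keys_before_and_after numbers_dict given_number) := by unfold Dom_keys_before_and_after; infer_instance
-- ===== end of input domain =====

-- B replaces A's linear scan over the sorted keys by a bisect_right binary search (idiomatic; same result).

-- ===== PORT A =====
-- the for-loop with mutable key_before / key_after and the break: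
def kbaLoop (given_number : Int) : List Int → Option Int → Option Int × Option Int
  | [], key_before => (key_before, none)
  | key :: rest, key_before =>
    let key_before := if key ≤ given_number then some key else key_before
    if given_number < key then (key_before, some key) else kbaLoop given_number rest key_before

def keys_before_and_after (numbers_dict : List (Int × Int)) (given_number : Int) : Option Int × Option Int :=
  let keys := PySem.List.sorted (numbers_dict.map (·.1)) (fun x => x)
  let r := kbaLoop given_number keys none
  let key_before := match r.1 with
    | none => keys.getLast?   -- keys[-1] if keys else None
    | some k => some k
  let key_after := match r.2 with
    | none => keys.head?      -- keys[0] if keys else None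
    | some k => some k
  (key_before, key_after)

-- ===== PORT B =====
def keys_before_and_after_alt (numbers_dict : List (Int × Int)) (given_number : Int) : Option Int × Option Int :=
  let keys := PySem.List.sorted (numbers_dict.map (·.1)) (fun x => x)
  if keys.isEmpty then (none, none)
  else
    let idx := PySem.List.bisectRight keys given_number   -- bisect.bisect_right
    let key_before := if idx > 0 then keys[idx - 1]? else keys.getLast?
    let key_after := if idx < keys.length then keys[idx]? else keys.head?
    (key_before, key_after)

-- ===== PRECONDITION & SPEC =====
def Spec_keys_before_and_after (numbers_dict : List (Int × Int)) (given_number : Int) (out : Option Int × Option Int) : Prop := out = keys_before_and_after_alt numbers_dict given_number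
instance (numbers_dict : List (Int × Int)) (given_number : Int) (out : Option Int × Option Int) : Decidable (Spec_keys_before_and_after numbers_dict given_number out) := by unfold Spec_keys_before_and_after; infer_instance

-- ===== CLAIM (what is proved, stated in full; the proofs are below) =====
def Claim_equal_keys_before_and_after : Prop := ∀ (numbers_dict : List (Int × Int)) (given_number : Int), Dom_keys_before_and_after numbers_dict given_number → Spec_keys_before_and_after numbers_dict given_number (keys_before_and_after numbers_dict given_number)

-- ===== LEMMAS AND PROOFS =====

-- On a list split at position n (everything before n is ≤ g, everything from n on is > g),
-- A's scan returns (keys[n-1]? if n>0 else the incoming accumulator, keys[n]?).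
theorem kbaLoop_eq (g : Int) (l : List Int) (n : Nat) (hn : n ≤ l.length)
    (h1 : ∀ j (hj : j < l.length), j < n → l[j] ≤ g)
    (h2 : ∀ j (hj : j < l.length), n ≤ j → g < l[j]) (kb : Option Int) :
    kbaLoop g l kb = (if n > 0 then l[n - 1]? else kb, l[n]?) := by
  induction l generalizing n kb with
  | nil =>
    have : n = 0 := Nat.le_zero.mp hn
    simp [this, kbaLoop]
  | cons k rest ih =>
    cases n with
    | zero =>
      have hk : g < k := h2 0 (by simp) (by omega)
      simp [kbaLoop, not_le.mpr hk, hk]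
    | succ m =>
      have hk : k ≤ g := h1 0 (by simp) (by omega)
      have hrec := ih m (by simpa using hn)
        (fun j hj hjm => by simpa using h1 (j+1) (by simpa using Nat.succ_lt_succ hj) (by omega))
        (fun j hj hjm => by simpa using h2 (j+1) (by simpa using Nat.succ_lt_succ hj) (by omega))
        (some k)
      simp only [kbaLoop, if_pos hk, if_neg (not_lt.mpr hk)]
      rw [hrec]
      cases m with
      | zero => simp
      | succ p => simp

theorem keys_before_and_after_spec : Claim_equal_keys_before_and_after := by
  intro numbers_dict given_number _
  unfold Spec_keys_before_and_after keys_before_and_after keys_before_and_after_alt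
  set keys := PySem.List.sorted (numbers_dict.map (·.1)) (fun x => x) with hkeys
  by_cases hemp : keys = []
  · simp [hemp, kbaLoop]
  · have hpw : keys.Pairwise (· ≤ ·) := PySem.List.sorted_pairwise (numbers_dict.map (·.1)) (fun x => x)
    obtain ⟨hle, h1, h2⟩ := PySem.List.bisectRight_spec keys given_number hpw
    set n := PySem.List.bisectRight keys given_number with hn
    have hloop := kbaLoop_eq given_number keys n hle h1 h2 none
    have hlen : 0 < keys.length := List.length_pos_iff.mpr hemp
    by_cases hpos : 0 < n
    · have hidx : n - 1 < keys.length := by omega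
      by_cases hlt : n < keys.length
      · simp [hemp, hloop, ← hn, hpos, hlt, List.getElem?_eq_getElem hidx]
      · have hnone : keys[n]? = none := List.getElem?_eq_none_iff.mpr (by omega)
        simp [hemp, hloop, ← hn, hpos, hlt, List.getElem?_eq_getElem hidx]
    · have hn0 : n = 0 := by omega
      have hlt : (0:Nat) < keys.length := hlen
      simp [hemp, hloop, ← hn, hn0, List.getElem?_eq_getElem hlt]
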